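-- pv_equiv track=rewrite | github.com/sun-hainan/Python | _worktree_backup/project_euler/problem_203/sol1.py | get_pascal_triangle_unique_coefficients
-- ===== SOURCE A (Python) =====
-- def get_pascal_triangle_unique_coefficients(depth: int) -> set[int]:
--     """
--     Returns the unique coefficients of a Pascal's triangle of depth "depth".
--
--     The coefficients of this triangle are symmetric. A further improvement to this
--     method could be to calculate the coefficients once per level. Nonetheless,
--     the current implementation is fast enough for the original problem.
--
--     >>> get_pascal_triangle_unique_coefficients(1)
--     {1}
--     >>> get_pascal_triangle_unique_coefficients(2)
--     {1}
--     >>> get_pascal_triangle_unique_coefficients(3)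
--     {1, 2}
--     >>> get_pascal_triangle_unique_coefficients(8)
--     {1, 2, 3, 4, 5, 6, 7, 35, 10, 15, 20, 21}
--     """
--     coefficients = {1}
--     previous_coefficients = [1]
--     for _ in range(2, depth + 1):
--     # 遍历循环
--         coefficients_begins_one = [*previous_coefficients, 0]
--         coefficients_ends_one = [0, *previous_coefficients]
--         previous_coefficients = []
--         for x, y in zip(coefficients_begins_one, coefficients_ends_one):
--     # 遍历循环
--             coefficients.add(x + y)
--             previous_coefficients.append(x + y)
--     return coefficients
-- ===== SOURCE B (Python) =====
-- import math
--
--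
-- def get_pascal_triangle_unique_coefficients(depth: int) -> set[int]:
--     coefficients = {1}
--     for n in range(depth):
--         for k in range(n + 1):
--             coefficients.add(math.comb(n, k))
--     return coefficients
-- ===== Notes on version B (the rewrite author's own statement) =====
-- stated objective: idiomatic
-- what changed: B computes each coefficient directly with math.comb(n, k) in two nested range loops instead of deriving each row from the previous one by shifted zip-addition, so no previous_coefficients row list is maintained.
import Mathlib
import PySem

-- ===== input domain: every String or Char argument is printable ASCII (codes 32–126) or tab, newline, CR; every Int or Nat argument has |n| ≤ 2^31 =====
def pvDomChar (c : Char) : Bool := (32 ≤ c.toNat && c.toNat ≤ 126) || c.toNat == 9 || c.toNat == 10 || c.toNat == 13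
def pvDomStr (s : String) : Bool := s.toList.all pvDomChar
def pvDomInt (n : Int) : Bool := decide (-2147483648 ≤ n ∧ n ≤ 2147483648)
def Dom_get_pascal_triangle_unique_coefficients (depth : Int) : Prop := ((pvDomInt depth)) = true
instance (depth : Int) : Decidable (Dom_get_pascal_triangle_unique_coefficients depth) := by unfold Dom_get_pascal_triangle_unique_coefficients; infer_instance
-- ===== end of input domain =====

-- B replaces A's row-by-row shifted zip-addition with direct math.comb(n, k) over two nested ranges (more idiomatic, same cost).

-- ===== PORT A =====
def get_pascal_triangle_unique_coefficients (depth : Int) : List Int :=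
  let st :=
    (PySem.List.pyRange 2 (depth + 1) 1).foldl
      (fun (st : PySem.Set Int × List Int) _ =>
        let coefficients_begins_one := st.2 ++ [(0 : Int)]
        let coefficients_ends_one := (0 : Int) :: st.2
        (coefficients_begins_one.zip coefficients_ends_one).foldl
          (fun (st2 : PySem.Set Int × List Int) p =>
            (PySem.Set.add st2.1 (p.1 + p.2), st2.2 ++ [p.1 + p.2]))
          (st.1, []))
      (PySem.Set.ofList [1], [1])
  st.1

-- ===== PORT B =====
def get_pascal_triangle_unique_coefficients_alt (depth : Int) : List Int :=
  (PySem.List.pyRange 0 depth 1).foldl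
    (fun (s : PySem.Set Int) n =>
      (PySem.List.pyRange 0 (n + 1) 1).foldl
        (fun (s2 : PySem.Set Int) k => PySem.Set.add s2 ((Nat.choose n.toNat k.toNat : Nat) : Int))
        s)
    (PySem.Set.ofList [1])

-- ===== PRECONDITION & SPEC =====
def Spec_get_pascal_triangle_unique_coefficients (depth : Int) (out : List Int) : Prop := out = get_pascal_triangle_unique_coefficients_alt depth
instance (depth : Int) (out : List Int) : Decidable (Spec_get_pascal_triangle_unique_coefficients depth out) := by unfold Spec_get_pascal_triangle_unique_coefficients; infer_instance

-- ===== CLAIM (what is proved, stated in full; the proofs are below) =====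
def Claim_equal_get_pascal_triangle_unique_coefficients : Prop := ∀ (depth : Int), Dom_get_pascal_triangle_unique_coefficients depth → Spec_get_pascal_triangle_unique_coefficients depth (get_pascal_triangle_unique_coefficients depth)

-- ===== LEMMAS AND PROOFS =====

-- the t-th binomial row, as integers
def pvRow (t : Nat) : List Int := (List.range (t + 1)).map (fun k => ((t.choose k : Nat) : Int))

def pvAddList (s : PySem.Set Int) (l : List Int) : PySem.Set Int := l.foldl PySem.Set.add s

-- the set of coefficients of the first d rows (rows 0 .. d-1), inserted row by row
def pvBuild : Nat → PySem.Set Int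
  | 0 => PySem.Set.ofList [1]
  | n + 1 => pvAddList (pvBuild n) (pvRow n)

theorem pvRow_length (t : Nat) : (pvRow t).length = t + 1 := by
  simp [pvRow]

theorem pvRow_getElem (t i : Nat) (h : i < t + 1) :
    (pvRow t)[i]'(by simp [pvRow_length, h]) = ((t.choose i : Nat) : Int) := by
  simp [pvRow]

-- the inner zip-add loop of A, in closed form
theorem pvInner (l : List (Int × Int)) (s : PySem.Set Int) (acc : List Int) :
    l.foldl (fun (st2 : PySem.Set Int × List Int) p =>
        (PySem.Set.add st2.1 (p.1 + p.2), st2.2 ++ [p.1 + p.2])) (s, acc)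
      = (pvAddList s (l.map (fun p => p.1 + p.2)), acc ++ l.map (fun p => p.1 + p.2)) := by
  induction l generalizing s acc with
  | nil => simp [pvAddList]
  | cons p l ih => simp [pvAddList, ih, List.foldl_cons]

-- Pascal's rule: the shifted zip-addition of row t is row (t+1)
theorem pvPascal (t : Nat) :
    ((pvRow t ++ [(0 : Int)]).zip ((0 : Int) :: pvRow t)).map (fun p => p.1 + p.2)
      = pvRow (t + 1) := by
  apply List.ext_getElem
  · simp [pvRow_length]
  · intro i h1 h2
    have hi : i < t + 2 := by simp [pvRow_length] at h2; omega
    have hz : i < ((pvRow t ++ [(0 : Int)]).zip ((0 : Int) :: pvRow t)).length := by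
      simp [pvRow_length]; omega
    rw [List.getElem_map, List.getElem_zip]
    rcases i with _ | j
    · -- i = 0
      have h0 : 0 < (pvRow t).length := by simp [pvRow_length]
      rw [List.getElem_append_left h0]
      simp [pvRow_getElem t 0 (by omega), pvRow_getElem (t + 1) 0 (by omega)]
    · -- i = j + 1
      have hj : j < t + 1 := by omega
      have hcons : ((0 : Int) :: pvRow t)[j + 1]'(by simp [pvRow_length]; omega)
          = ((t.choose j : Nat) : Int) := by
        simpa using pvRow_getElem t j hj
      have happ : (pvRow t ++ [(0 : Int)])[j + 1]'(by simp [pvRow_length]; omega)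
          = ((t.choose (j + 1) : Nat) : Int) := by
        by_cases hlt : j + 1 < t + 1
        · rw [List.getElem_append_left (by simp [pvRow_length]; omega)]
          exact pvRow_getElem t (j + 1) hlt
        · have hjt : j = t := by omega
          subst hjt
          rw [List.getElem_append_right (by simp [pvRow_length])]
          simp [pvRow_length, Nat.choose_succ_self]
      rw [hcons, happ, pvRow_getElem (t + 1) (j + 1) hi]
      rw [Nat.choose_succ_succ]
      push_cast
      ring

-- A's outer loop, characterized
theorem pvAfold (d : Nat) :
    (PySem.List.pyRange 2 (2 + d) 1).foldl
      (fun (st : PySem.Set Int × List Int) _ =>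
        let coefficients_begins_one := st.2 ++ [(0 : Int)]
        let coefficients_ends_one := (0 : Int) :: st.2
        (coefficients_begins_one.zip coefficients_ends_one).foldl
          (fun (st2 : PySem.Set Int × List Int) p =>
            (PySem.Set.add st2.1 (p.1 + p.2), st2.2 ++ [p.1 + p.2]))
          (st.1, []))
      (PySem.Set.ofList [1], [1])
      = (pvBuild (d + 1), pvRow d) := by
  induction d with
  | zero =>
    rw [PySem.List.pyRange_one_eq_nil (by omega)]
    simp only [List.foldl_nil]
    have h1 : pvBuild 1 = PySem.Set.ofList [1] := by decide
    have h2 : pvRow 0 = [1] := by decide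
    rw [h1, h2]
  | succ n ih =>
    have hsplit : PySem.List.pyRange 2 (2 + (n + 1 : Nat)) 1
        = PySem.List.pyRange 2 (2 + n) 1 ++ [(2 + n : Int)] := by
      have := PySem.List.pyRange_one_succ_right (a := 2) (b := 2 + (n : Int)) (by omega)
      push_cast
      push_cast at this
      convert this using 2
    rw [hsplit, List.foldl_append, ih]
    simp only [List.foldl_cons, List.foldl_nil]
    rw [pvInner, pvPascal]
    rfl

-- B's step for one n, characterized
theorem pvBstep (j : Nat) (s : PySem.Set Int) :
    (PySem.List.pyRange 0 ((j : Int) + 1) 1).foldl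
      (fun (s2 : PySem.Set Int) k =>
        PySem.Set.add s2 ((Nat.choose (j : Int).toNat k.toNat : Nat) : Int)) s
      = pvAddList s (pvRow j) := by
  have hr : PySem.List.pyRange 0 ((j : Int) + 1) 1
      = (List.range (j + 1)).map (fun k : Nat => (k : Int)) := by
    have := PySem.List.pyRange_zero_natCast (n := j + 1)
    push_cast at this ⊢
    exact this
  rw [hr, List.foldl_map]
  simp only [Int.toNat_natCast]
  rw [pvAddList, pvRow, List.foldl_map]

-- B's outer loop, characterized
theorem pvBfold (d : Nat) :
    (PySem.List.pyRange 0 (d : Int) 1).foldl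
      (fun (s : PySem.Set Int) n =>
        (PySem.List.pyRange 0 (n + 1) 1).foldl
          (fun (s2 : PySem.Set Int) k => PySem.Set.add s2 ((Nat.choose n.toNat k.toNat : Nat) : Int))
          s)
      (PySem.Set.ofList [1])
      = pvBuild d := by
  induction d with
  | zero =>
    rw [PySem.List.pyRange_one_eq_nil (by omega)]
    rfl
  | succ n ih =>
    have hsplit : PySem.List.pyRange 0 ((n + 1 : Nat) : Int) 1
        = PySem.List.pyRange 0 (n : Int) 1 ++ [(n : Int)] := by
      have := PySem.List.pyRange_one_succ_right (a := 0) (b := (n : Int)) (by omega)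
      push_cast at this ⊢
      exact this
    rw [hsplit, List.foldl_append, ih]
    simp only [List.foldl_cons, List.foldl_nil]
    exact pvBstep n (pvBuild n)

theorem pv_main (depth : Int) :
    get_pascal_triangle_unique_coefficients depth
      = get_pascal_triangle_unique_coefficients_alt depth := by
  by_cases h : depth ≤ 0
  · unfold get_pascal_triangle_unique_coefficients get_pascal_triangle_unique_coefficients_alt
    rw [PySem.List.pyRange_one_eq_nil (by omega), PySem.List.pyRange_one_eq_nil (by omega)]
    rfl
  · rw [Int.not_le] at h
    obtain ⟨d, hd⟩ : ∃ d : Nat, depth = (d : Int) + 1 :=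
      ⟨(depth - 1).toNat, by omega⟩
    subst hd
    unfold get_pascal_triangle_unique_coefficients get_pascal_triangle_unique_coefficients_alt
    have hA := pvAfold d
    have hB := pvBfold (d + 1)
    have heq : (PySem.List.pyRange 2 ((d : Int) + 1 + 1) 1)
        = PySem.List.pyRange 2 (2 + (d : Nat)) 1 := by
      congr 1
      omega
    rw [heq]
    simp only
    rw [hA]
    have heqB : ((d : Int) + 1) = (((d + 1 : Nat)) : Int) := by push_cast; ring
    rw [heqB, hB]

-- ===== VERDICT (by name: the statement is the Claim_ definition above) =====
theorem get_pascal_triangle_unique_coefficients_spec : Claim_equal_get_pascal_triangle_unique_coefficients := by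
  intro depth _
  unfold Spec_get_pascal_triangle_unique_coefficients
  exact pv_main depth
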